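-- pv_equiv track=rewrite | github.com/rlegg15/devPanel | FltLog.py | makList
-- ===== SOURCE A (Python) =====
-- def makList(lin):
--      j=1
--      n=1
--      linpv = "ACCL:L" + str(lin) + "B:"
--
--      pvList = []
--      if  lin == 0:
--         for j in range(1,9):
--             pvList.append(linpv + "01" + str(j) +"0:RFS:INTLK_FIRST")
--
--      if  lin == 1:
--         for n in range(2,4):
--            for j in range(1,9):
--               pvList.append(linpv + "0"+str(n) + str(j) +"0:RFS:INTLK_FIRST")
--         for n in range(1,3):
--            for j in range(1, 9):
--               pvList.append(linpv + "H" +str(n) +str(j) + "0:RFS:INTLK_FIRST")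
--
--      if  lin == 2:
--         for n in range(4,16):
--            if n < 10:
--              for j in range(1,9):
--                 pvList.append(linpv + "0" + str(n) + str(j) +"0:RFS:INTLK_FIRST")
--            else:
--              for j in range(1,9):
--                 pvList.append(linpv + str(n) +str(j) + "0:RFS:INTLK_FIRST")
--
--      if  lin == 3:
--         for n in range(16,36):
--            for j in range(1,9):
--               pvList.append(linpv + str(n) + str(j) +"0:RFS:INTLK_FIRST")
--      return pvList
-- ===== SOURCE B (Python) =====
-- def makList(lin):
--     if lin == 0:
--         groups = ["01"]
--     elif lin == 1:
--         groups = ["02", "03", "H1", "H2"]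
--     elif lin == 2:
--         groups = ["%02d" % n for n in range(4, 16)]
--     elif lin == 3:
--         groups = [str(n) for n in range(16, 36)]
--     else:
--         groups = []
--     linpv = "ACCL:L" + str(lin) + "B:"
--     return [linpv + g + str(j) + "0:RFS:INTLK_FIRST"
--             for g in groups for j in range(1, 9)]
-- ===== Notes on version B (the rewrite author's own statement) =====
-- stated objective: simpler
-- what changed: Replaces the four bespoke conditional loop nests (with an inline zero-padding branch) by one ordered table of two-character prefixes selected by lin, followed by a single uniform comprehension over (prefix, channel).
import Mathlib
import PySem

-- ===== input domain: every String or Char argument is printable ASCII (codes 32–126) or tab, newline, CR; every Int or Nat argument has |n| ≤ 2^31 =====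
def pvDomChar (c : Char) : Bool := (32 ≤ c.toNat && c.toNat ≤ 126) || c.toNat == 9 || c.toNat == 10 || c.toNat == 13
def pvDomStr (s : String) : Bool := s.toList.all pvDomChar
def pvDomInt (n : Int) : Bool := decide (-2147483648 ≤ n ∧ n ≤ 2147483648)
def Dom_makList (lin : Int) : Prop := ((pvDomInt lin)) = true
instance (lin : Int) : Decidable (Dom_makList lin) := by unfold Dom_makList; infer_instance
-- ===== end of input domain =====

-- B replaces A's four bespoke conditional loop nests by a prefix table plus one uniform pass; objective: simpler.

-- ===== PORT A =====
def makList (lin : Int) : List String :=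
  let linpv := "ACCL:L" ++ PySem.Int.toStr lin ++ "B:"
  let pvList : List String := []
  let pvList :=
    if lin = 0 then
      (PySem.List.pyRange 1 9 1).foldl
        (fun acc j => acc ++ [linpv ++ "01" ++ PySem.Int.toStr j ++ "0:RFS:INTLK_FIRST"]) pvList
    else pvList
  let pvList :=
    if lin = 1 then
      let pvList :=
        (PySem.List.pyRange 2 4 1).foldl
          (fun acc n => (PySem.List.pyRange 1 9 1).foldl
            (fun acc j => acc ++ [linpv ++ "0" ++ PySem.Int.toStr n ++ PySem.Int.toStr j ++ "0:RFS:INTLK_FIRST"]) acc) pvList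
      (PySem.List.pyRange 1 3 1).foldl
        (fun acc n => (PySem.List.pyRange 1 9 1).foldl
          (fun acc j => acc ++ [linpv ++ "H" ++ PySem.Int.toStr n ++ PySem.Int.toStr j ++ "0:RFS:INTLK_FIRST"]) acc) pvList
    else pvList
  let pvList :=
    if lin = 2 then
      (PySem.List.pyRange 4 16 1).foldl
        (fun acc n =>
          if n < 10 then
            (PySem.List.pyRange 1 9 1).foldl
              (fun acc j => acc ++ [linpv ++ "0" ++ PySem.Int.toStr n ++ PySem.Int.toStr j ++ "0:RFS:INTLK_FIRST"]) acc
          else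
            (PySem.List.pyRange 1 9 1).foldl
              (fun acc j => acc ++ [linpv ++ PySem.Int.toStr n ++ PySem.Int.toStr j ++ "0:RFS:INTLK_FIRST"]) acc) pvList
    else pvList
  let pvList :=
    if lin = 3 then
      (PySem.List.pyRange 16 36 1).foldl
        (fun acc n => (PySem.List.pyRange 1 9 1).foldl
          (fun acc j => acc ++ [linpv ++ PySem.Int.toStr n ++ PySem.Int.toStr j ++ "0:RFS:INTLK_FIRST"]) acc) pvList
    else pvList
  pvList

-- ===== PORT B =====
-- "%02d" % n for 0 ≤ n < 100 (B only uses it on 4..15)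
def pad2 (n : Int) : String :=
  if n < 10 then "0" ++ PySem.Int.toStr n else PySem.Int.toStr n

def makList_alt (lin : Int) : List String :=
  let groups : List String :=
    if lin = 0 then ["01"]
    else if lin = 1 then ["02", "03", "H1", "H2"]
    else if lin = 2 then (PySem.List.pyRange 4 16 1).map pad2
    else if lin = 3 then (PySem.List.pyRange 16 36 1).map PySem.Int.toStr
    else []
  let linpv := "ACCL:L" ++ PySem.Int.toStr lin ++ "B:"
  groups.flatMap (fun g =>
    (PySem.List.pyRange 1 9 1).map
      (fun j => linpv ++ g ++ PySem.Int.toStr j ++ "0:RFS:INTLK_FIRST"))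

-- ===== PRECONDITION & SPEC =====
def Spec_makList (lin : Int) (out : List String) : Prop := out = makList_alt lin
instance (lin : Int) (out : List String) : Decidable (Spec_makList lin out) := by unfold Spec_makList; infer_instance

-- ===== CLAIM (what is proved, stated in full; the proofs are below) =====
def Claim_equal_makList : Prop := ∀ (lin : Int), Dom_makList lin → Spec_makList lin (makList lin)

-- ===== LEMMAS AND PROOFS =====

theorem makList_other (lin : Int) (h0 : lin ≠ 0) (h1 : lin ≠ 1) (h2 : lin ≠ 2) (h3 : lin ≠ 3) :
    makList lin = makList_alt lin := by
  simp [makList, makList_alt, h0, h1, h2, h3]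

-- ===== VERDICT (by name: the statement is the Claim_ definition above) =====
set_option maxRecDepth 20000 in
theorem makList_spec : Claim_equal_makList := by
  intro lin _
  show makList lin = makList_alt lin
  by_cases h0 : lin = 0
  · subst h0; decide
  by_cases h1 : lin = 1
  · subst h1; decide
  by_cases h2 : lin = 2
  · subst h2; decide
  by_cases h3 : lin = 3
  · subst h3; decide
  exact makList_other lin h0 h1 h2 h3
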